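-- pv_equiv track=rewrite | github.com/Yeom-Yeom/CodingTest_Practice | Lv.1/page1/cut_string.py | cut_string
-- ===== SOURCE A (Python) =====
-- def cut_string(s):
--     answer = 0
--     t = ["",0,0] # 지정문자, 지정문자 수, 비교문자 수
--
--     for i in s:
--         if t[0] == "":  # 처음 지정문자 잡아주기
--             t[0] = i
--             t[1] += 1
--         else:
--             if t[0] == i: # 지정문자 == 비교문자
--                 t[1]+=1
--             else: # 지정문자 != 비교문자
--                 t[2]+=1
--             if t[1] == t[2]: # 문자 수가 서로 같을 때
--                 answer+=1
--                 t = ["",0,0]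
--     if t != ["",0,0]:
--         answer+=1
--     return answer
-- ===== SOURCE B (Python) =====
-- def cut_string(s):
--     def rest_after_cut(ref, bal, t):
--         # consume chars of t until the signed balance returns to 0; return the remainder
--         for k, c in enumerate(t):
--             bal = bal + 1 if c == ref else bal - 1
--             if bal == 0:
--                 return t[k + 1:]
--         return ""
--
--     answer = 0
--     while s:
--         s = rest_after_cut(s[0], 1, s[1:])
--         answer += 1
--     return answer
-- ===== Notes on version B (the rewrite author's own statement) =====
-- stated objective: simpler
-- what changed: Replaces A's mutable 3-field state (reference char, match count, mismatch count) checked every step with a segment-consuming helper that tracks a single signed balance and a recursive outer count of segments (zero-crossings), with no end-of-loop leftover-state correction.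
import Mathlib
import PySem

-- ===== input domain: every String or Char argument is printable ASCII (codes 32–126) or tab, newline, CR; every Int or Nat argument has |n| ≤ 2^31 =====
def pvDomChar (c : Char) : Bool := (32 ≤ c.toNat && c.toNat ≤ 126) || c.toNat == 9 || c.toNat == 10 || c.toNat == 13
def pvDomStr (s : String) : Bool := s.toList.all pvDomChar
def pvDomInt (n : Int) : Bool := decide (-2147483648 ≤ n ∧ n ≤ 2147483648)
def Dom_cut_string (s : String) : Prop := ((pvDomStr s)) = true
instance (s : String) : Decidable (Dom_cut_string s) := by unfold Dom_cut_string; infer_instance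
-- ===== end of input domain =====

-- B replaces A's (ref char, match count, mismatch count) state by a single signed balance whose
-- zero-crossings delimit segments, counted by a recursive outer loop; objective: simpler.

-- ===== PORT A =====
-- one loop step of A: state = (answer, 지정문자 ("" modelled as none), 지정문자 수, 비교문자 수)
def cutStep (st : Int × Option Char × Int × Int) (c : Char) : Int × Option Char × Int × Int :=
  match st with
  | (answer, t0, t1, t2) =>
    match t0 with
    | none => (answer, some c, t1 + 1, t2)
    | some r =>
      let p := if r = c then (t1 + 1, t2) else (t1, t2 + 1)
      if p.1 = p.2 then (answer + 1, none, 0, 0) else (answer, some r, p.1, p.2)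

def cut_string (s : String) : Int :=
  let st := s.toList.foldl cutStep (0, none, 0, 0)
  if st.2.1 = none ∧ st.2.2.1 = 0 ∧ st.2.2.2 = 0 then st.1 else st.1 + 1

-- ===== PORT B =====
-- rest_after_cut: consume chars until the signed balance returns to 0; return the remainder
def restAfterCut (ref : Char) (bal : Int) : List Char → List Char
  | [] => []
  | c :: t =>
    let bal' := if c = ref then bal + 1 else bal - 1
    if bal' = 0 then t else restAfterCut ref bal' t

theorem restAfterCut_length_le (ref : Char) (bal : Int) (l : List Char) :
    (restAfterCut ref bal l).length ≤ l.length := by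
  induction l generalizing bal with
  | nil => simp [restAfterCut]
  | cons c t ih =>
    simp only [restAfterCut]
    split <;> split <;> first | exact Nat.le_succ _ | exact Nat.le_succ_of_le (ih _)

def countSegs : List Char → Int
  | [] => 0
  | c :: t => 1 + countSegs (restAfterCut c 1 t)
termination_by l => l.length
decreasing_by
  simp only [List.length_cons]
  exact Nat.lt_succ_of_le (restAfterCut_length_le c 1 t)

def cut_string_alt (s : String) : Int := countSegs s.toList

-- ===== PRECONDITION & SPEC =====
def Spec_cut_string (s : String) (out : Int) : Prop := out = cut_string_alt s
instance (s : String) (out : Int) : Decidable (Spec_cut_string s out) := by unfold Spec_cut_string; infer_instance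

-- ===== CLAIM (what is proved, stated in full; the proofs are below) =====
def Claim_equal_cut_string : Prop := ∀ (s : String), Dom_cut_string s → Spec_cut_string s (cut_string s)

-- ===== LEMMAS AND PROOFS =====

theorem countSegs_nil : countSegs [] = 0 := by rw [countSegs.eq_def]

theorem countSegs_cons (c : Char) (t : List Char) :
    countSegs (c :: t) = 1 + countSegs (restAfterCut c 1 t) := by rw [countSegs.eq_def]

-- A's final answer read off a fold starting in state st
def resultA (st : Int × Option Char × Int × Int) (l : List Char) : Int :=
  let st' := l.foldl cutStep st
  if st'.2.1 = none ∧ st'.2.2.1 = 0 ∧ st'.2.2.2 = 0 then st'.1 else st'.1 + 1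

-- Main invariant, both loop phases at once
theorem resultA_countSegs (l : List Char) :
    (∀ a : Int, resultA (a, none, 0, 0) l = a + countSegs l) ∧
    (∀ (a : Int) (r : Char) (t1 t2 : Int), t2 < t1 →
      resultA (a, some r, t1, t2) l = a + 1 + countSegs (restAfterCut r (t1 - t2) l)) := by
  induction l with
  | nil =>
    constructor
    · intro a; simp [resultA, countSegs_nil]
    · intro a r t1 t2 _; simp [resultA, restAfterCut, countSegs_nil]
  | cons c t ih =>
    constructor
    · intro a
      have h1 : resultA (a, none, 0, 0) (c :: t) = resultA (a, some c, 1, 0) t := by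
        simp [resultA, List.foldl_cons, cutStep]
      rw [h1, ih.2 a c 1 0 (by norm_num)]
      rw [countSegs_cons]; ring_nf
    · intro a r t1 t2 hlt
      by_cases hc : r = c
      · -- match: t1 grows; cannot equalize since t2 < t1
        have hne : ¬ (t1 + 1 = t2) := by omega
        have h1 : resultA (a, some r, t1, t2) (c :: t) = resultA (a, some r, t1 + 1, t2) t := by
          simp [resultA, List.foldl_cons, cutStep, hc, hne]
        have h2 : restAfterCut r (t1 - t2) (c :: t) = restAfterCut r (t1 - t2 + 1) t := by
          have : ¬ (t1 - t2 + 1 = 0) := by omega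
          simp [restAfterCut, hc, this]
        rw [h1, h2, ih.2 a r (t1 + 1) t2 (by omega)]
        have : t1 + 1 - t2 = t1 - t2 + 1 := by ring
        rw [this]
      · -- mismatch: t2 grows
        by_cases heq : t1 = t2 + 1
        · -- balance hits 0: segment closes
          have h1 : resultA (a, some r, t1, t2) (c :: t) = resultA (a + 1, none, 0, 0) t := by
            simp [resultA, List.foldl_cons, cutStep, hc, heq]
          have hc' : ¬ c = r := fun h => hc h.symm
          have h2 : restAfterCut r (t1 - t2) (c :: t) = t := by
            have hb : t1 - t2 - 1 = 0 := by omega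
            simp [restAfterCut, hc', hb]
          rw [h1, h2, ih.1 (a + 1)]
        · have hne : ¬ (t1 = t2 + 1) := heq
          have h1 : resultA (a, some r, t1, t2) (c :: t) = resultA (a, some r, t1, t2 + 1) t := by
            simp [resultA, List.foldl_cons, cutStep, hc, hne]
          have hc' : ¬ c = r := fun h => hc h.symm
          have h2 : restAfterCut r (t1 - t2) (c :: t) = restAfterCut r (t1 - t2 - 1) t := by
            have : ¬ (t1 - t2 - 1 = 0) := by omega
            simp [restAfterCut, hc', this]
          rw [h1, h2, ih.2 a r t1 (t2 + 1) (by omega)]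
          have : t1 - (t2 + 1) = t1 - t2 - 1 := by ring
          rw [this]

-- ===== VERDICT (by name: the statement is the Claim_ definition above) =====
theorem cut_string_spec : Claim_equal_cut_string := by
  intro s _
  unfold Spec_cut_string cut_string cut_string_alt
  have := (resultA_countSegs s.toList).1 0
  simpa [resultA] using this
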